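-- pv_equiv track=rewrite | github.com/VeeraSaiJoshik/AllStateJarvis | TUI/solutions/data_structures/coordinate_compression.py | intervals_coverage
-- ===== SOURCE A (Python) =====
-- from typing import List, Tuple, Dict
--
-- def intervals_coverage(intervals: List[List[int]], points: List[int]) -> List[int]:
--     """For each point, count how many intervals contain it."""
--     events = []
--     for start, end in intervals:
--         events.append((start, 1))
--         events.append((end + 1, -1))
--
--     events.sort()
--     points_sorted = sorted((p, i) for i, p in enumerate(points))
--     result = [0] * len(points)
--     curr = 0
--     ei = 0
--
--     for p, idx in points_sorted:
--         while ei < len(events) and events[ei][0] <= p: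
--             curr += events[ei][1]
--             ei += 1
--         result[idx] = curr
--
--     return result
-- ===== SOURCE B (Python) =====
-- from typing import List
--
-- def intervals_coverage(intervals: List[List[int]], points: List[int]) -> List[int]:
--     """For each point, count how many intervals contain it.
--
--     count(p) = #{start <= p} - #{end + 1 <= p}: build both sorted arrays once,
--     answer each query with two binary searches (bisect_right, hand-rolled since
--     this module imports nothing but typing)."""
--     starts = sorted(s for s, e in intervals)
--     ends1 = sorted(e + 1 for s, e in intervals)
--
--     def br(arr, x):
--         # bisect.bisect_right(arr, x)
--         lo, hi = 0, len(arr)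
--         while lo < hi:
--             mid = (lo + hi) // 2
--             if arr[mid] <= x:
--                 lo = mid + 1
--             else:
--                 hi = mid
--         return lo
--
--     return [br(starts, p) - br(ends1, p) for p in points]
-- ===== Notes on version B (the rewrite author's own statement) =====
-- stated objective: faster
-- what changed: Replaces the event-merge sweep (sorted events + sorted (point,index) pairs + running counter written back through an index permutation) by two prebuilt sorted arrays of starts and end+1 values queried per point in original order with binary search, using count(p) = #{start<=p} - #{end+1<=p}.
import Mathlib
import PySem

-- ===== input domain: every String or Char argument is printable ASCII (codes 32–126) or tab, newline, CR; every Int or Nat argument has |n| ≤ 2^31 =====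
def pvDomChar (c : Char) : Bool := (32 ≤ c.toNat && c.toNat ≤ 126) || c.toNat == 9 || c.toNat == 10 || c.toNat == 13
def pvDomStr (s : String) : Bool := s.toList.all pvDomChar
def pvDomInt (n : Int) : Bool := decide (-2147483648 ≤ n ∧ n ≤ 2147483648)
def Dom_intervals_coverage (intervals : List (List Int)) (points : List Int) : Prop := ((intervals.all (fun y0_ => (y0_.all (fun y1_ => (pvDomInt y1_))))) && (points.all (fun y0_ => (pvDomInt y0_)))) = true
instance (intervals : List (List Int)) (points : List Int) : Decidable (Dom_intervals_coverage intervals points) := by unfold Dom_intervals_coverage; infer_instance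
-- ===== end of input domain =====

-- B replaces A's event-merge sweep by two prebuilt sorted arrays (starts, end+1) queried per point with binary search.

-- ===== PORT A =====
-- events: for start, end in intervals: append (start, 1); append (end + 1, -1).
-- A row of length ≠ 2 makes Python raise ValueError (excluded by Pre_); the port skips such a row.
def icEvents (intervals : List (List Int)) : List (Int × Int) :=
  intervals.foldl (fun ev iv =>
    match iv with
    | [s, e] => ev ++ [(s, 1), (e + 1, -1)]
    | _ => ev) []

-- the inner 'while ei < len(events) and events[ei][0] <= p' loop (remaining events, running counter)
def icAdvance (evs : List (Int × Int)) (p : Int) (curr : Int) : List (Int × Int) × Int :=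
  match evs with
  | [] => ([], curr)
  | ev :: rest => if ev.1 ≤ p then icAdvance rest p (curr + ev.2) else (ev :: rest, curr)

-- the 'for p, idx in points_sorted' loop: result[idx] = curr
def icSweep (ps : List (Int × Int)) (evs : List (Int × Int)) (result : List Int) (curr : Int) : List Int :=
  match ps with
  | [] => result
  | (p, idx) :: rest =>
    let st := icAdvance evs p curr
    icSweep rest st.1 (result.set idx.toNat st.2) st.2

def intervals_coverage (intervals : List (List Int)) (points : List Int) : List Int :=
  let events := PySem.List.sorted2 (icEvents intervals) Prod.fst Prod.snd
  let points_sorted := PySem.List.sorted2 ((PySem.List.enumerate points).map (fun ip => (ip.2, ip.1))) Prod.fst Prod.snd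
  icSweep points_sorted events (List.replicate points.length 0) 0

-- ===== PORT B =====
-- 'sorted(s for s, e in intervals)': the genexp's tuple unpack raises on rows of length ≠ 2 (outside Pre_); the port skips them.
def icStarts (intervals : List (List Int)) : List Int :=
  intervals.filterMap (fun iv => match iv with | [s, _] => some s | _ => none)

def icEnds1 (intervals : List (List Int)) : List Int :=
  intervals.filterMap (fun iv => match iv with | [_, e] => some (e + 1) | _ => none)

-- Source B's 'br' is verbatim bisect.bisect_right's binary search, ported as PySem.List.bisectRight (the same algorithm)
def intervals_coverage_alt (intervals : List (List Int)) (points : List Int) : List Int :=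
  let starts := PySem.List.sorted (icStarts intervals) (fun x => x)
  let ends1 := PySem.List.sorted (icEnds1 intervals) (fun x => x)
  points.map (fun p => (PySem.List.bisectRight starts p : Int) - (PySem.List.bisectRight ends1 p : Int))

-- ===== PRECONDITION & SPEC =====
-- Pre_ excludes exactly the inputs where Python A raises ValueError: a row that is not a 2-element list
-- (tuple unpacking 'for start, end in intervals' fails; B's genexp raises on the same rows).
def Pre_intervals_coverage (intervals : List (List Int)) (_points : List Int) : Prop :=
  ∀ iv ∈ intervals, iv.length = 2
instance (intervals : List (List Int)) (points : List Int) : Decidable (Pre_intervals_coverage intervals points) := by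
  unfold Pre_intervals_coverage; infer_instance

def pvWitness_intervals_coverage : List (List Int) × List Int := ([[1, 3], [2, 5], [4, 1]], [0, 2, 3, 6])

def Spec_intervals_coverage (intervals : List (List Int)) (points : List Int) (out : List Int) : Prop := out = intervals_coverage_alt intervals points
instance (intervals : List (List Int)) (points : List Int) (out : List Int) : Decidable (Spec_intervals_coverage intervals points out) := by unfold Spec_intervals_coverage; infer_instance

-- ===== CLAIM (what is proved, stated in full; the proofs are below) =====
def Claim_equal_intervals_coverage : Prop := ∀ (intervals : List (List Int)) (points : List Int), Dom_intervals_coverage intervals points → Pre_intervals_coverage intervals points → Spec_intervals_coverage intervals points (intervals_coverage intervals points)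

-- ===== LEMMAS AND PROOFS =====

-- the per-point answer both sides compute: #{start ≤ p} − #{end+1 ≤ p}
def icAns (intervals : List (List Int)) (p : Int) : Int :=
  ((icStarts intervals).countP (fun s => decide (s ≤ p)) : Int)
    - ((icEnds1 intervals).countP (fun e => decide (e ≤ p)) : Int)

def icEventRow (iv : List Int) : List (Int × Int) :=
  match iv with
  | [s, e] => [(s, 1), (e + 1, -1)]
  | _ => []

-- insertBy with a 'before' that underapproximates a transitive total relation R preserves Pairwise R
theorem pairwise_insertBy_of {α : Type} (R : α → α → Prop) (before : α → α → Bool)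
    (hRb : ∀ a b, before a b = true → R a b) (hRnb : ∀ a b, before a b = false → R b a)
    (htrans : ∀ {a b c : α}, R a b → R b c → R a c)
    (x : α) (ys : List α) (h : ys.Pairwise R) :
    (PySem.List.insertBy before x ys).Pairwise R := by
  induction ys with
  | nil => simp [PySem.List.insertBy]
  | cons y ys ih =>
    rcases List.pairwise_cons.mp h with ⟨hy, hys⟩
    by_cases hb : before x y = true
    · simp only [PySem.List.insertBy, hb, if_true]
      refine List.pairwise_cons.mpr ⟨?_, h⟩
      intro z hz
      rcases List.mem_cons.mp hz with rfl | hz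
      · exact hRb _ _ hb
      · exact htrans (hRb _ _ hb) (hy _ hz)
    · simp only [PySem.List.insertBy, hb]
      refine List.pairwise_cons.mpr ⟨?_, ih hys⟩
      intro z hz
      rcases (PySem.List.mem_insertBy before x z ys).mp hz with rfl | hz
      · exact hRnb _ _ (by simpa using hb)
      · exact hy _ hz

-- sorted2 with Int keys is nondecreasing in the first key
theorem sorted2_pairwise_fst {α : Type} (xs : List α) (k1 k2 : α → Int) :
    (PySem.List.sorted2 xs k1 k2).Pairwise (fun a b => k1 a ≤ k1 b) := by
  show (xs.foldl (fun acc x => PySem.List.insertBy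
      (fun a b => decide (k1 a < k1 b) || !decide (k1 b < k1 a) && decide (k2 a < k2 b)) x acc) []).Pairwise _
  suffices h : ∀ (acc : List α), acc.Pairwise (fun a b => k1 a ≤ k1 b) →
      (xs.foldl (fun acc x => PySem.List.insertBy
        (fun a b => decide (k1 a < k1 b) || !decide (k1 b < k1 a) && decide (k2 a < k2 b)) x acc) acc).Pairwise
        (fun a b => k1 a ≤ k1 b) from h [] (by simp)
  induction xs with
  | nil => intro acc hacc; simpa using hacc
  | cons x xs ih =>
    intro acc hacc
    refine ih _ (pairwise_insertBy_of (fun a b => k1 a ≤ k1 b) _ ?_ ?_ (fun hab hbc => le_trans hab hbc) x acc hacc)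
    · intro a b hb
      simp only [Bool.or_eq_true, Bool.and_eq_true, decide_eq_true_eq, Bool.not_eq_true',
        decide_eq_false_iff_not] at hb
      rcases hb with h | ⟨h, _⟩
      · exact le_of_lt h
      · exact le_of_not_gt h
    · intro a b hb
      simp only [Bool.or_eq_false_iff, Bool.and_eq_false_iff, Bool.not_eq_false',
        decide_eq_true_eq, decide_eq_false_iff_not] at hb
      exact le_of_not_gt hb.1

-- icAdvance is takeWhile/dropWhile plus the sum of the consumed deltas
theorem icAdvance_eq (evs : List (Int × Int)) (p curr : Int) :
    icAdvance evs p curr =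
      (evs.dropWhile (fun ev => decide (ev.1 ≤ p)),
       curr + ((evs.takeWhile (fun ev => decide (ev.1 ≤ p))).map Prod.snd).sum) := by
  induction evs generalizing curr with
  | nil => simp [icAdvance]
  | cons ev rest ih =>
    by_cases h : ev.1 ≤ p
    · simp [icAdvance, h, ih]; ring
    · simp [icAdvance, h]

theorem takeWhile_eq_self_of_all {α : Type} (q : α → Bool) (l : List α)
    (h : ∀ a ∈ l, q a = true) : l.takeWhile q = l := by
  induction l with
  | nil => rfl
  | cons a t ih =>
    rw [List.takeWhile_cons, if_pos (h a (List.mem_cons_self ..))]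
    exact congrArg _ (ih (fun a ha => h a (List.mem_cons_of_mem _ ha)))

-- the sweep writes, for each (p, idx), the total delta of the events with coordinate ≤ p
theorem icSweep_eq (E : List (Int × Int)) (ps : List (Int × Int)) :
    ∀ (C evs : List (Int × Int)) (curr : Int) (r : List Int),
      E = C ++ evs → curr = (C.map Prod.snd).sum →
      (∀ ev ∈ C, ∀ q ∈ ps, ev.1 ≤ q.1) →
      ps.Pairwise (fun a b => a.1 ≤ b.1) →
      icSweep ps evs r curr =
        ps.foldl (fun r pi =>
          r.set pi.2.toNat ((E.takeWhile (fun ev => decide (ev.1 ≤ pi.1))).map Prod.snd).sum) r := by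
  induction ps with
  | nil => intro C evs curr r _ _ _ _; simp [icSweep]
  | cons pi rest ih =>
    intro C evs curr r hE hcurr hC hps
    obtain ⟨p, idx⟩ := pi
    rcases List.pairwise_cons.mp hps with ⟨hple, hrest⟩
    have hCp : ∀ ev ∈ C, decide (ev.1 ≤ p) = true := by
      intro ev hev
      exact decide_eq_true (hC ev hev (p, idx) (List.mem_cons_self ..))
    have htake : E.takeWhile (fun ev => decide (ev.1 ≤ p))
        = C ++ evs.takeWhile (fun ev => decide (ev.1 ≤ p)) := by
      rw [hE, List.takeWhile_append, if_pos (by rw [takeWhile_eq_self_of_all _ _ hCp])]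
    show icSweep ((p, idx) :: rest) evs r curr = _
    rw [icSweep, icAdvance_eq]
    simp only [List.foldl_cons]
    refine ih (C ++ evs.takeWhile (fun ev => decide (ev.1 ≤ p)))
        (evs.dropWhile (fun ev => decide (ev.1 ≤ p))) _ _ ?_ ?_ ?_ hrest |>.trans ?_
    · rw [hE, List.append_assoc, List.takeWhile_append_dropWhile]
    · rw [List.map_append, List.sum_append, hcurr]
    · intro ev hev q hq
      rcases List.mem_append.mp hev with hev | hev
      · exact le_trans (hC ev hev (p, idx) (List.mem_cons_self ..)) (hple q hq)
      · have hevp := List.mem_takeWhile_imp (p := fun e2 : Int × Int => decide (e2.1 ≤ p)) hev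
        exact le_trans (by simpa using hevp) (hple q hq)
    · rw [htake, List.map_append, List.sum_append, hcurr]

-- for a list sorted on first components, takeWhile (fst ≤ p) is filter (fst ≤ p)
theorem takeWhile_fst_eq_filter (E : List (Int × Int)) (p : Int)
    (h : E.Pairwise (fun a b => a.1 ≤ b.1)) :
    E.takeWhile (fun ev => decide (ev.1 ≤ p)) = E.filter (fun ev => decide (ev.1 ≤ p)) := by
  induction E with
  | nil => rfl
  | cons a t ih =>
    rcases List.pairwise_cons.mp h with ⟨ha, ht⟩
    by_cases hap : a.1 ≤ p
    · rw [List.takeWhile_cons, List.filter_cons, if_pos (decide_eq_true hap),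
        if_pos (decide_eq_true hap), ih ht]
    · rw [List.takeWhile_cons, if_neg (by simpa using hap), List.filter_cons,
        if_neg (by simpa using hap)]
      rw [eq_comm, List.filter_eq_nil_iff]
      intro b hb
      simp only [decide_eq_true_eq]
      intro hbp
      exact hap (le_trans (ha b hb) hbp)

theorem icEvents_eq_flatMap (l : List (List Int)) : icEvents l = l.flatMap icEventRow := by
  suffices h : ∀ acc : List (Int × Int), l.foldl (fun ev iv =>
      match iv with
      | [s, e] => ev ++ [(s, 1), (e + 1, -1)]
      | _ => ev) acc = acc ++ l.flatMap icEventRow from h []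
  induction l with
  | nil => intro acc; simp
  | cons iv t ih =>
    intro acc
    rw [List.foldl_cons, List.flatMap_cons, ih]
    rcases iv with _ | ⟨s, _ | ⟨e, _ | ⟨x, rest⟩⟩⟩ <;> simp [icEventRow]

-- the total delta of events with coordinate ≤ p is exactly icAns (rows all of length 2)
theorem sum_filter_events (l : List (List Int)) (h2 : ∀ iv ∈ l, iv.length = 2) (p : Int) :
    (((icEvents l).filter (fun ev => decide (ev.1 ≤ p))).map Prod.snd).sum = icAns l p := by
  rw [icEvents_eq_flatMap]
  induction l with
  | nil => simp [icAns, icStarts, icEnds1]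
  | cons iv t ih =>
    have hiv : iv.length = 2 := h2 iv (List.mem_cons_self ..)
    rcases iv with _ | ⟨s, _ | ⟨e, _ | ⟨x, rest⟩⟩⟩ <;> simp at hiv
    have iht := ih (fun iv hiv => h2 iv (List.mem_cons_of_mem _ hiv))
    simp only [List.flatMap_cons, icEventRow, List.filter_append, List.map_append,
      List.sum_append, iht]
    simp only [icAns, icStarts, icEnds1, List.filterMap_cons, List.countP_cons]
    by_cases hs : s ≤ p <;> by_cases he : e + 1 ≤ p <;>
      simp [hs, he] <;> ring

-- countP (· ≤ x) of a ≤-sorted list is determined by any cut point in the bisectRight style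
theorem countP_le_of_cut (xs : List Int) (x : Int) :
    ∀ n : Nat, n ≤ xs.length →
      (∀ (j : Nat) (hj : j < xs.length), j < n → xs[j] ≤ x) →
      (∀ (j : Nat) (hj : j < xs.length), n ≤ j → x < xs[j]) →
      xs.countP (fun y => decide (y ≤ x)) = n := by
  induction xs with
  | nil => intro n hn _ _; simpa using (Nat.le_zero.mp hn).symm
  | cons y t ih =>
    intro n hn h1 h2
    cases n with
    | zero =>
      rw [List.countP_cons]
      have hy : x < y := h2 0 (by simp) (Nat.zero_le _)
      rw [ih 0 (Nat.zero_le _) (by omega)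
        (fun j hj _ => h2 (j + 1) (by simpa using Nat.succ_lt_succ hj) (Nat.zero_le _))]
      simp [not_le.mpr hy]
    | succ m =>
      rw [List.countP_cons]
      have hy : y ≤ x := h1 0 (by simp) (Nat.succ_pos _)
      rw [ih m (by simpa using hn)
        (fun j hj hjm => h1 (j + 1) (by simpa using Nat.succ_lt_succ hj) (by omega))
        (fun j hj hmj => h2 (j + 1) (by simpa using Nat.succ_lt_succ hj) (by omega))]
      simp [hy]

-- bisectRight on the sorted list counts exactly the elements ≤ x of the original list
theorem bisectRight_sorted_eq_countP (xs : List Int) (x : Int) :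
    PySem.List.bisectRight (PySem.List.sorted xs (fun y => y)) x
      = xs.countP (fun y => decide (y ≤ x)) := by
  set s := PySem.List.sorted xs (fun y => y) with hs
  have hpair : s.Pairwise (fun a b => a ≤ b) := PySem.List.sorted_pairwise xs (fun y => y)
  obtain ⟨hle, h1, h2⟩ := PySem.List.bisectRight_spec s x hpair
  rw [← (PySem.List.sorted_perm xs (fun y => y) false).countP_eq, ← hs]
  exact (countP_le_of_cut s x _ hle h1 h2).symm

-- B is the per-point map of icAns
theorem alt_eq_map (l : List (List Int)) (pts : List Int) :
    intervals_coverage_alt l pts = pts.map (icAns l) := by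
  unfold intervals_coverage_alt
  refine List.map_congr_left (fun p _ => ?_)
  rw [bisectRight_sorted_eq_countP, bisectRight_sorted_eq_countP]
  rfl

-- ---- A-side assembly ----

theorem length_foldl_set (g : Int → Int) (qs : List (Int × Int)) (r : List Int) :
    (qs.foldl (fun r pi => r.set pi.2.toNat (g pi.1)) r).length = r.length := by
  induction qs generalizing r with
  | nil => rfl
  | cons q t ih => rw [List.foldl_cons, ih, List.length_set]

theorem foldl_set_getElem?_of_not_mem (g : Int → Int) (qs : List (Int × Int)) (r : List Int)
    (j : Nat) (hnot : ∀ pi ∈ qs, pi.2.toNat ≠ j) :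
    (qs.foldl (fun r pi => r.set pi.2.toNat (g pi.1)) r)[j]? = r[j]? := by
  induction qs generalizing r with
  | nil => rfl
  | cons q t ih =>
    rw [List.foldl_cons, ih _ (fun pi hpi => hnot pi (List.mem_cons_of_mem _ hpi)),
      List.getElem?_set_ne (hnot q (List.mem_cons_self ..))]

theorem foldl_set_getElem?_of_mem (g : Int → Int) (qs : List (Int × Int)) (r : List Int)
    (p i : Int) (hmem : (p, i) ∈ qs) (hnodup : (qs.map (fun pi => pi.2.toNat)).Nodup)
    (hi : i.toNat < r.length) :
    (qs.foldl (fun r pi => r.set pi.2.toNat (g pi.1)) r)[i.toNat]? = some (g p) := by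
  induction qs generalizing r with
  | nil => cases hmem
  | cons q t ih =>
    rw [List.map_cons, List.nodup_cons] at hnodup
    rcases List.mem_cons.mp hmem with heq | hmem
    · subst heq
      rw [List.foldl_cons]
      rw [foldl_set_getElem?_of_not_mem g t _ _ (by
        intro pi hpi h
        exact hnodup.1 (h ▸ List.mem_map_of_mem hpi))]
      simp only
      rw [List.getElem?_set_self (by simpa using hi)]
    · rw [List.foldl_cons]
      exact ih _ hmem hnodup.2 (by simpa using hi)

def icSwapped (points : List Int) : List (Int × Int) :=
  (PySem.List.enumerate points).map (fun ip => (ip.2, ip.1))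

theorem mem_icSwapped (points : List Int) (p i : Int) :
    (p, i) ∈ icSwapped points ↔ ∃ (k : Nat) (h : k < points.length), i = (k : Int) ∧ p = points[k] := by
  simp only [icSwapped, List.mem_map]
  constructor
  · rintro ⟨ip, hip, heq⟩
    rcases (PySem.List.mem_enumerate_iff points 0 ip).mp hip with ⟨k, hk, rfl⟩
    refine ⟨k, hk, ?_, ?_⟩
    · simpa using congrArg Prod.snd heq.symm
    · simpa using congrArg Prod.fst heq.symm
  · rintro ⟨k, hk, rfl, rfl⟩
    exact ⟨((k : Int), points[k]), (PySem.List.mem_enumerate_iff points 0 _).mpr ⟨k, hk, by simp⟩, rfl⟩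

theorem nodup_icSwapped_idx (points : List Int) :
    ((icSwapped points).map (fun pi => pi.2.toNat)).Nodup := by
  have h := PySem.List.pairwise_lt_enumerate points 0
  have h0 : ∀ ip ∈ PySem.List.enumerate points 0, 0 ≤ ip.1 := by
    intro ip hip
    rcases (PySem.List.mem_enumerate_iff points 0 ip).mp hip with ⟨k, hk, rfl⟩
    simp
  have : ((icSwapped points).map (fun pi => pi.2.toNat)).Pairwise (· < ·) := by
    simp only [icSwapped, List.map_map]
    refine (List.pairwise_map).mpr ?_
    refine h.imp_of_mem ?_
    intro a b ha hb hab
    have := h0 a ha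
    simp only [Function.comp]
    omega
  exact this.nodup

-- A is the same per-point map of icAns
theorem a_eq_map (l : List (List Int)) (pts : List Int) (h2 : ∀ iv ∈ l, iv.length = 2) :
    intervals_coverage l pts = pts.map (icAns l) := by
  show icSweep (PySem.List.sorted2 (icSwapped pts) Prod.fst Prod.snd)
      (PySem.List.sorted2 (icEvents l) Prod.fst Prod.snd)
      (List.replicate pts.length 0) 0 = pts.map (icAns l)
  set E := PySem.List.sorted2 (icEvents l) Prod.fst Prod.snd with hEdef
  set ps := PySem.List.sorted2 (icSwapped pts) Prod.fst Prod.snd with hpsdef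
  have hEpair : E.Pairwise (fun a b => a.1 ≤ b.1) := sorted2_pairwise_fst _ _ _
  have hpspair : ps.Pairwise (fun a b => a.1 ≤ b.1) := sorted2_pairwise_fst _ _ _
  have hpsperm : ps.Perm (icSwapped pts) := PySem.List.sorted2_perm _ _ _ _
  have hval : ∀ p : Int,
      ((E.takeWhile (fun ev => decide (ev.1 ≤ p))).map Prod.snd).sum = icAns l p := by
    intro p
    rw [takeWhile_fst_eq_filter E p hEpair]
    have hperm : (E.filter (fun ev => decide (ev.1 ≤ p))).Perm
        ((icEvents l).filter (fun ev => decide (ev.1 ≤ p))) :=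
      (PySem.List.sorted2_perm _ _ _ _).filter _
    rw [(hperm.map Prod.snd).sum_eq]
    exact sum_filter_events l h2 p
  rw [icSweep_eq E ps [] E 0 (List.replicate pts.length 0) rfl rfl (by simp) hpspair]
  have hfuneq : (fun (r : List Int) (pi : Int × Int) =>
        r.set pi.2.toNat ((E.takeWhile (fun ev => decide (ev.1 ≤ pi.1))).map Prod.snd).sum)
      = (fun (r : List Int) (pi : Int × Int) => r.set pi.2.toNat (icAns l pi.1)) := by
    funext r pi; rw [hval pi.1]
  rw [hfuneq]
  have hnodup : (ps.map (fun pi => pi.2.toNat)).Nodup :=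
    ((hpsperm.map (fun pi => pi.2.toNat)).nodup_iff).mpr (nodup_icSwapped_idx pts)
  have hlen : (ps.foldl (fun r pi => r.set pi.2.toNat (icAns l pi.1))
      (List.replicate pts.length 0)).length = pts.length := by
    rw [length_foldl_set]; simp
  refine List.ext_getElem? (fun j => ?_)
  by_cases hj : j < pts.length
  · have hmem : ((pts[j] : Int), (j : Int)) ∈ ps :=
      hpsperm.mem_iff.mpr ((mem_icSwapped pts _ _).mpr ⟨j, hj, rfl, rfl⟩)
    have := foldl_set_getElem?_of_mem (icAns l) ps (List.replicate pts.length 0)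
      pts[j] (j : Int) hmem hnodup (by simpa using hj)
    simp only [Int.toNat_natCast] at this
    rw [this, List.getElem?_map, List.getElem?_eq_getElem hj]
    rfl
  · rw [List.getElem?_eq_none (by rw [hlen]; omega),
      List.getElem?_eq_none (by simp; omega)]

-- ===== VERDICT (by name: the statement is the Claim_ definition above) =====
theorem intervals_coverage_spec : Claim_equal_intervals_coverage := by
  intro intervals points _ hpre
  unfold Spec_intervals_coverage
  rw [a_eq_map intervals points hpre, alt_eq_map]
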